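-- pv_equiv track=rewrite | github.com/goodvc78/naming-feature-analysis | 01-2. extract-naming-words-in-python-source.py | ev_equal_rule
-- ===== SOURCE A (Python) =====
-- def ev_equal_rule(line):
--     """
--     변수는 변할수 있는 값이라는 전제로 값을 변하게 하는 equal(=) 연산자의 left token을 변수를 함
--     """
--     line = line.replace('==',' ')
--     equal_pos = line.find('=')
--     if equal_pos < 0:
--         return None
--     line = ''.join( c if (c.isalnum()) | (c=='_') else ' ' for c in line[:equal_pos] )
--     val = line.split()[-1]
--     if len(val)>0:
--         return [val]
--     return None
-- ===== SOURCE B (Python) =====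
-- def ev_equal_rule(line):
--     line = line.replace('==', ' ')
--     equal_pos = line.find('=')
--     if equal_pos < 0:
--         return None
--     chars = []
--     for c in reversed(line[:equal_pos]):
--         if c.isalnum() or c == '_':
--             chars.append(c)
--         elif chars:
--             break
--     if not chars:
--         return None
--     return [''.join(reversed(chars))]
-- ===== Notes on version B (the rewrite author's own statement) =====
-- stated objective: alternative
-- what changed: A masks every non-word character of the prefix to spaces, builds a new string, splits it into all tokens and indexes the last; B does a single backward scan from the '=' that collects only the characters of the last word token and stops at the first gap.
-- outside the precondition, e.g. on ev_equal_rule('='): A raises IndexError, B returns None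
-- crash fix: On lines whose first '=' (after '==' is blanked) has no alphanumeric/underscore character before it, A raises IndexError on line.split()[-1]; B returns None. — e.g. on ev_equal_rule(" = 1"): A raises IndexError, B returns none
import Mathlib
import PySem

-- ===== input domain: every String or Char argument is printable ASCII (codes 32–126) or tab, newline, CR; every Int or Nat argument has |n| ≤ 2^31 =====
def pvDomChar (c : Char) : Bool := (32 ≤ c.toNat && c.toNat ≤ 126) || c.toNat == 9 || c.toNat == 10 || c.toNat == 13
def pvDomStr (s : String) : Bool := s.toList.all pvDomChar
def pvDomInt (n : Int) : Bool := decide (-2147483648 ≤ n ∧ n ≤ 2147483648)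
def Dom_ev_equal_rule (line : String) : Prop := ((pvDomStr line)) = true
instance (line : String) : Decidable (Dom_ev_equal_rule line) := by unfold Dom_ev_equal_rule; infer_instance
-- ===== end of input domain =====

-- B replaces A's mask-every-char-then-split-then-index tokenization by a single backward
-- scan that collects only the last word token before the '=' (objective: alternative).

-- the token-character test `c.isalnum() or c == '_'` both Pythons use
def pvIsWord (c : Char) : Bool := PySem.Chars.isalnum c || c == '_'

-- ===== PORT A =====
def ev_equal_rule (line : String) : Option (List String) :=
  let line1 := PySem.Str.replace line "==" " "
  let ep := PySem.Str.find line1 "="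
  if ep < 0 then none
  else
    -- ''.join(c if (c.isalnum())|(c=='_') else ' ' for c in line[:equal_pos])
    let masked := String.ofList
      (((PySem.Str.slice line1 none (some ep)).toList).map (fun c => if pvIsWord c then c else ' '))
    -- line.split()[-1] — the `none` branch is Python's IndexError, excluded by Pre_
    match PySem.List.pyGet? (PySem.Str.split₀ masked) (-1) with
    | none => none
    | some val => if 0 < PySem.Str.len val then some [val] else none

-- ===== PORT B =====
-- `for c in reversed(line[:equal_pos])`: collect word chars into `chars` (append),
-- break at the first non-word char once something was collected
def pvCollect : List Char → List Char → List Char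
  | acc, [] => acc
  | acc, c :: rest =>
    if pvIsWord c then pvCollect (acc ++ [c]) rest
    else if acc.isEmpty then pvCollect acc rest else acc

def ev_equal_rule_alt (line : String) : Option (List String) :=
  let line1 := PySem.Str.replace line "==" " "
  let ep := PySem.Str.find line1 "="
  if ep < 0 then none
  else
    let chars := pvCollect [] ((PySem.Str.slice line1 none (some ep)).toList.reverse)
    if chars.isEmpty then none
    else some [String.ofList chars.reverse]   -- [''.join(reversed(chars))]

-- ===== PRECONDITION & SPEC =====
-- Pre_ excludes exactly the inputs where A raises IndexError on `line.split()[-1]`: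
-- a first '=' (after '==' is blanked) with no alnum/underscore character anywhere before it.
def Pre_ev_equal_rule (line : String) : Prop :=
  let line1 := PySem.Str.replace line "==" " "
  let ep := PySem.Str.find line1 "="
  0 ≤ ep → ((PySem.Str.slice line1 none (some ep)).toList.any pvIsWord) = true
instance (line : String) : Decidable (Pre_ev_equal_rule line) := by
  unfold Pre_ev_equal_rule; infer_instance
def pvWitness_ev_equal_rule : String := "a = 1"

-- On lines whose first '=' (after '==' is blanked) has no word character before it, A raises
-- IndexError; B returns None (no token found), matching A's own `return None` convention.
def Raises_ev_equal_rule (line : String) : Prop :=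
  let line1 := PySem.Str.replace line "==" " "
  let ep := PySem.Str.find line1 "="
  0 ≤ ep ∧ ((PySem.Str.slice line1 none (some ep)).toList.any pvIsWord) = false
instance (line : String) : Decidable (Raises_ev_equal_rule line) := by
  unfold Raises_ev_equal_rule; infer_instance
def pvRaiseWitness_ev_equal_rule : String := " = 1"
def pvRaiseWitnessOut_ev_equal_rule : Option (List String) := none

def Spec_ev_equal_rule (line : String) (out : Option (List String)) : Prop :=
  out = ev_equal_rule_alt line
instance (line : String) (out : Option (List String)) : Decidable (Spec_ev_equal_rule line out) := by
  unfold Spec_ev_equal_rule; infer_instance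

-- ===== CLAIM (what is proved, stated in full; the proofs are below) =====
def Claim_equal_ev_equal_rule : Prop :=
  ∀ (line : String), Dom_ev_equal_rule line → Pre_ev_equal_rule line →
    Spec_ev_equal_rule line (ev_equal_rule line)
def Claim_raises_ev_equal_rule : Prop :=
  (∀ (line : String), Dom_ev_equal_rule line → Raises_ev_equal_rule line → ¬ Pre_ev_equal_rule line) ∧
  (Dom_ev_equal_rule (pvRaiseWitness_ev_equal_rule) ∧ Raises_ev_equal_rule (pvRaiseWitness_ev_equal_rule) ∧
    ev_equal_rule_alt (pvRaiseWitness_ev_equal_rule) = pvRaiseWitnessOut_ev_equal_rule)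

-- ===== LEMMAS AND PROOFS =====

-- proof-only tokenizer: the list of maximal word-character runs of a list
def pvWR : List Char → List (List Char)
  | [] => []
  | c :: rest =>
    if pvIsWord c then (c :: rest.takeWhile pvIsWord) :: pvWR (rest.dropWhile pvIsWord)
    else pvWR rest
termination_by l => l.length
decreasing_by
  · exact Nat.lt_succ_of_le (List.length_dropWhile_le _ _)
  · simp

lemma pv_word_not_space (c : Char) (h : pvIsWord c = true) : PySem.Chars.isspace c = false := by
  have hn : (65 ≤ c.toNat ∧ c.toNat ≤ 90) ∨ (97 ≤ c.toNat ∧ c.toNat ≤ 122) ∨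
      (48 ≤ c.toNat ∧ c.toNat ≤ 57) ∨ c.toNat = 95 := by
    simp only [pvIsWord, PySem.Chars.isalnum, PySem.Chars.isalpha, PySem.Chars.isdigit,
      PySem.Chars.isupper, PySem.Chars.islower, Bool.or_eq_true, Bool.and_eq_true,
      decide_eq_true_eq, beq_iff_eq, Char.le_def, UInt32.le_iff_toNat_le, Char.toNat] at h
    rcases h with (((⟨a,b⟩|⟨a,b⟩)|⟨a,b⟩)|rfl) <;> simp_all <;> omega
  simp only [PySem.Chars.isspace, Bool.or_eq_false_iff, Bool.and_eq_false_iff,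
    decide_eq_false_iff_not]
  omega

lemma pv_go_inv (cs : List Char) : ∀ (cur : List Char) (acc : List (List Char)),
    PySem.Chars.split₀.go (cs.map (fun c => if pvIsWord c then c else ' ')) cur acc =
      acc.reverse ++ (if cur.isEmpty then pvWR cs
        else (cur.reverse ++ cs.takeWhile pvIsWord) :: pvWR (cs.dropWhile pvIsWord)) := by
  induction cs with
  | nil =>
    intro cur acc
    cases cur <;> simp [PySem.Chars.split₀.go, pvWR]
  | cons c rest ih =>
    intro cur acc
    by_cases hw : pvIsWord c
    · have hs : PySem.Chars.isspace c = false := pv_word_not_space c hw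
      simp only [List.map_cons, hw, if_true, PySem.Chars.split₀.go, hs, Bool.false_eq_true,
        if_false, ih (c :: cur) acc]
      cases cur <;> simp [pvWR, hw, List.takeWhile_cons, List.dropWhile_cons]
    · have hw' : pvIsWord c = false := by simpa using hw
      have hs : PySem.Chars.isspace ' ' = true := by decide
      simp only [List.map_cons, hw', Bool.false_eq_true, if_false, PySem.Chars.split₀.go, hs,
        if_true]
      cases cur with
      | nil => simp [ih [] acc, pvWR, hw']
      | cons d cur' =>
        simp only [List.isEmpty_cons, if_false, ih [] ((d :: cur').reverse :: acc)]
        simp [pvWR, hw', List.takeWhile_cons, List.dropWhile_cons]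

lemma pv_wr_nil_iff (cs : List Char) : pvWR cs = [] ↔ ∀ c ∈ cs, pvIsWord c = false := by
  fun_induction pvWR cs with
  | case1 => simp
  | case2 c rest hw ih => simp [pvWR, hw]
  | case3 c rest hw ih =>
    have hw' : pvIsWord c = false := by simpa using hw
    simp [hw', ih]

-- helper: a trailing char failing p does not change takeWhile
lemma pv_takeWhile_snoc_neg {p : Char → Bool} {c : Char} (hc : p c = false) (D : List Char) :
    (D ++ [c]).takeWhile p = D.takeWhile p := by
  rw [List.takeWhile_append]
  split_ifs with h
  · have : D.takeWhile p = D := (List.takeWhile_prefix p).eq_of_length h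
    simp [this, hc]
  · rfl

lemma pv_takeWhile_all {p : Char → Bool} {l : List Char} (h : ∀ x ∈ l, p x = true) :
    l.takeWhile p = l := List.takeWhile_eq_self_iff.mpr h

lemma pv_dropWhile_all_neg {p : Char → Bool} {l : List Char} (h : ∀ x ∈ l, p x = false) :
    l.dropWhile p = l := by
  cases l with
  | nil => rfl
  | cons a t => rw [List.dropWhile_cons_of_neg (by simp [h a (by simp)])]

lemma pv_main (P : List Char) :
    (pvWR P).getLast? =
      (if ((P.reverse.dropWhile (fun c => !pvIsWord c)).takeWhile pvIsWord).isEmpty then none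
       else some ((P.reverse.dropWhile (fun c => !pvIsWord c)).takeWhile pvIsWord).reverse) := by
  fun_induction pvWR P with
  | case1 => simp
  | case2 c rest hw ih =>
    set u := rest.takeWhile pvIsWord with hu
    set v := rest.dropWhile pvIsWord with hvd
    have hrest : u ++ v = rest := List.takeWhile_append_dropWhile
    have hPrev : (c :: rest).reverse = v.reverse ++ (u.reverse ++ [c]) := by
      rw [← hrest]; simp
    have huw : ∀ x ∈ u.reverse ++ [c], pvIsWord x = true := by
      intro x hx
      rcases List.mem_append.mp hx with hx | hx
      · exact List.mem_takeWhile_imp (List.mem_reverse.mp hx)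
      · simp at hx; subst hx; exact hw
    by_cases hv : pvWR v = []
    · have hall : ∀ x ∈ v.reverse, (fun c => !pvIsWord c) x = true := by
        intro x hx
        simp [(pv_wr_nil_iff v).mp hv x (List.mem_reverse.mp hx)]
      have hdrop : (c :: rest).reverse.dropWhile (fun c => !pvIsWord c) = u.reverse ++ [c] := by
        rw [hPrev, List.dropWhile_append]
        simp only [List.dropWhile_eq_nil_iff.mpr hall, List.isEmpty_nil, if_true]
        exact pv_dropWhile_all_neg (by intro x hx; simp [huw x hx])
      rw [hdrop, pv_takeWhile_all huw]
      simp [hv]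
    · -- the last run is inside v
      have hvne : v ≠ [] := by intro h0; rw [h0] at hv; simp [pvWR] at hv
      have hD : v.reverse.dropWhile (fun c => !pvIsWord c) ≠ [] := by
        intro hnil
        have := List.dropWhile_eq_nil_iff.mp hnil
        apply hv
        exact (pv_wr_nil_iff v).mpr (by intro x hx; simpa using this x (List.mem_reverse.mpr hx))
      set D := v.reverse.dropWhile (fun c => !pvIsWord c) with hDdef
      have hdrop : (c :: rest).reverse.dropWhile (fun c => !pvIsWord c) = D ++ (u.reverse ++ [c]) := by
        rw [hPrev, List.dropWhile_append]
        simp only [List.isEmpty_iff]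
        rw [if_neg hD]
      -- D's last element is v's head, which is not a word char
      obtain ⟨x0, t0, hv0⟩ := List.exists_cons_of_ne_nil hvne
      have hx0 : pvIsWord x0 = false := by
        have := List.head?_dropWhile_not pvIsWord rest
        rw [← hvd, hv0] at this
        simpa using this
      have hDlast : D.getLast? = some x0 := by
        obtain ⟨t, ht⟩ := List.dropWhile_suffix (l := v.reverse) (fun c => !pvIsWord c)
        have : v.reverse.getLast? = D.getLast? := by
          rw [← ht]; exact List.getLast?_append_of_ne_nil t hD
        rw [List.getLast?_reverse, hv0] at this
        simpa using this.symm
      have htake : (D ++ (u.reverse ++ [c])).takeWhile pvIsWord = D.takeWhile pvIsWord := by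
        rw [List.takeWhile_append]
        split_ifs with h
        · exfalso
          have hDall : D.takeWhile pvIsWord = D := (List.takeWhile_prefix pvIsWord).eq_of_length h
          have := List.takeWhile_eq_self_iff.mp hDall x0 (List.mem_of_getLast? hDlast)
          simp [this] at hx0
        · rfl
      rw [hdrop, htake]
      rw [← ih]
      obtain ⟨y, t, hy⟩ := List.exists_cons_of_ne_nil hv
      rw [hy]
      simp [List.getLast?_cons]
  | case3 c rest hw ih =>
    have hw' : pvIsWord c = false := by simpa using hw
    rw [ih]
    have : (c :: rest).reverse = rest.reverse ++ [c] := by simp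
    rw [this, List.dropWhile_append]
    by_cases h : List.dropWhile (fun c => !pvIsWord c) rest.reverse = []
    · simp only [h, List.isEmpty_nil, if_true]
      rw [List.dropWhile_cons_of_pos (by simp [hw']), List.dropWhile_nil]
    · simp only [List.isEmpty_iff]
      rw [if_neg h, pv_takeWhile_snoc_neg hw']


lemma pv_collect_ne (R : List Char) : ∀ acc : List Char, acc ≠ [] →
    pvCollect acc R = acc ++ R.takeWhile pvIsWord := by
  induction R with
  | nil => intro acc h; simp [pvCollect]
  | cons c rest ih =>
    intro acc h
    by_cases hw : pvIsWord c
    · rw [pvCollect, if_pos hw, ih (acc ++ [c]) (by simp), List.takeWhile_cons_of_pos hw]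
      simp
    · have hw' : pvIsWord c = false := by simpa using hw
      rw [pvCollect, if_neg (by simp [hw']), if_neg (by simp [List.isEmpty_iff, h]),
        List.takeWhile_cons_of_neg (by simp [hw'])]
      simp

lemma pv_collect_nil (R : List Char) :
    pvCollect [] R = (R.dropWhile (fun c => !pvIsWord c)).takeWhile pvIsWord := by
  induction R with
  | nil => simp [pvCollect]
  | cons c rest ih =>
    by_cases hw : pvIsWord c
    · rw [pvCollect, if_pos hw, show ([] : List Char) ++ [c] = [c] from rfl,
        pv_collect_ne rest [c] (by simp),
        List.dropWhile_cons_of_neg (by simp [hw]), List.takeWhile_cons_of_pos hw]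
      rfl
    · have hw' : pvIsWord c = false := by simpa using hw
      rw [pvCollect, if_neg (by simp [hw']), if_pos (by simp), ih,
        List.dropWhile_cons_of_pos (by simp [hw'])]

lemma pv_pyGet_neg_one {α : Type} (l : List α) : PySem.List.pyGet? l (-1) = l.getLast? := by
  cases l with
  | nil => simp [PySem.List.pyGet?, PySem.List.pyIdx?]
  | cons a t =>
    simp only [PySem.List.pyGet?, PySem.List.pyIdx?]
    have h1 : ¬ ((0:Int) ≤ -1) := by omega
    have h2 : -((a :: t).length : Int) ≤ -1 := by simp
    rw [if_neg h1, if_pos h2]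
    simp [List.getLast?_eq_getElem?]

lemma pv_split₀_masked (cs : List Char) :
    PySem.Chars.split₀ (cs.map (fun c => if pvIsWord c then c else ' ')) = pvWR cs := by
  unfold PySem.Chars.split₀
  rw [pv_go_inv cs [] []]
  simp


lemma pv_core (P : List Char) :
    (match PySem.List.pyGet? (PySem.Str.split₀
        (String.ofList (P.map (fun c => if pvIsWord c then c else ' ')))) (-1) with
     | none => (none : Option (List String))
     | some val => if 0 < PySem.Str.len val then some [val] else none) =
    (if (pvCollect [] P.reverse).isEmpty then none
     else some [String.ofList (pvCollect [] P.reverse).reverse]) := by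
  have hsplit : PySem.Str.split₀
      (String.ofList (P.map (fun c => if pvIsWord c then c else ' ')))
      = (pvWR P).map String.ofList := by
    unfold PySem.Str.split₀
    rw [String.toList_ofList, pv_split₀_masked]
  rw [hsplit, pv_pyGet_neg_one, List.getLast?_map, pv_main, pv_collect_nil]
  set T := (P.reverse.dropWhile (fun c => !pvIsWord c)).takeWhile pvIsWord with hT
  by_cases hT0 : T.isEmpty
  · simp [hT0]
  · have hne : T ≠ [] := by simpa [List.isEmpty_iff] using hT0
    have hT0' : T.isEmpty = false := by simpa using hT0
    simp only [hT0', Bool.false_eq_true, if_false, Option.map_some]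
    have hlen : 0 < PySem.Str.len (String.ofList T.reverse) := by
      simp only [PySem.Str.len, String.toList_ofList, List.length_reverse]
      exact_mod_cast List.length_pos_iff.mpr hne
    rw [if_pos hlen]

-- ===== VERDICT (by name: the statement is the Claim_ definition above) =====
set_option maxHeartbeats 1000000 in
theorem ev_equal_rule_spec : Claim_equal_ev_equal_rule := by
  intro line _ _
  unfold Spec_ev_equal_rule
  simp only [ev_equal_rule, ev_equal_rule_alt]
  by_cases h : PySem.Str.find (PySem.Str.replace line "==" " ") "=" < 0
  · rw [if_pos h, if_pos h]
  · rw [if_neg h, if_neg h]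
    generalize (PySem.Str.slice (PySem.Str.replace line "==" " ") none
      (some (PySem.Str.find (PySem.Str.replace line "==" " ") "="))).toList = P
    exact pv_core P

theorem ev_equal_rule_raises : Claim_raises_ev_equal_rule := by
  unfold Claim_raises_ev_equal_rule
  refine ⟨?_, by decide⟩
  intro line _ hr hp
  unfold Raises_ev_equal_rule at hr
  unfold Pre_ev_equal_rule at hp
  obtain ⟨h1, h2⟩ := hr
  rw [hp h1] at h2
  simp at h2

-- self-check: the raise witness indeed lies outside Pre_ (a corollary of ev_equal_rule_raises)
theorem pvRaiseWitness_outside_pre_ok : ¬ Pre_ev_equal_rule pvRaiseWitness_ev_equal_rule := by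
  have h := ev_equal_rule_raises
  unfold Claim_raises_ev_equal_rule at h
  exact h.1 _ (by decide) h.2.2.1
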